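-- pv_equiv track=rewrite | github.com/maikka39/Google-Foobar | Level 5/Disorderly Escape/solution.py | solution
-- ===== SOURCE A (Python) =====
-- from math import factorial
-- from collections import Counter
--
-- def gcd(b, a):
--     a, b = abs(a), abs(b)
--     while b != 0:
--         a, b = b, a % b
--     return a
--
-- def partitions(n):
--     if n == 0:
--         yield ()
--         return
--
--     for p in partitions(n-1):
--         yield (1, ) + p
--         if p and (len(p) < 2 or p[1] > p[0]):
--             yield (p[0] + 1, ) + p[1:]
--
-- def coefficient_factor(partition, n):
--     output = factorial(n)
--     for a, b in Counter(partition).items():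
--         output //= (a**b) * factorial(b)
--     return output
--
-- def solution(width, height, states):
--     n = 0
--     height_partitions = tuple(partitions(height))
--     for width_partition in partitions(width):
--         for height_partition in height_partitions:
--             width_factor = coefficient_factor(width_partition, width)
--             height_factor = coefficient_factor(height_partition, height)
--
--             power = 0
--             for i in width_partition:
--                 for j in height_partition:
--                     power += gcd(i, j)
--
--             n += width_factor * height_factor * (states ** power)
--
--     return str(n // (factorial(width) * factorial(height)))
-- ===== SOURCE B (Python) =====
-- from math import factorial, gcd
--
--
-- def _parts_min(n, m):
--     """All partitions of n as ascending lists with every part >= m (m >= 1),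
--     by recursion on the remaining amount with a minimum-part bound."""
--     if n == 0:
--         return [[]]
--     out = []
--     for k in range(m, n + 1):
--         for rest in _parts_min(n - k, k):
--             out.append([k] + rest)
--     return out
--
--
-- def _counter(xs):
--     c = {}
--     for x in xs:
--         c[x] = c.get(x, 0) + 1
--     return list(c.items())
--
--
-- def _factor(items, n):
--     out = factorial(n)
--     for a, b in items:
--         out //= a ** b * factorial(b)
--     return out
--
--
-- def solution(width, height, states):
--     wcs = [_counter(p) for p in _parts_min(width, 1)]
--     hcs = [_counter(p) for p in _parts_min(height, 1)]
--     total = 0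
--     for wc in wcs:
--         wf = _factor(wc, width)
--         for hc in hcs:
--             hf = _factor(hc, height)
--             power = sum(ci * cj * gcd(i, j) for i, ci in wc for j, cj in hc)
--             total += wf * hf * states ** power
--     return str(total // (factorial(width) * factorial(height)))
-- ===== Notes on version B (the rewrite author's own statement) =====
-- stated objective: alternative
-- what changed: B replaces A's incremental recursive partition generator with a min-part-bounded recursion on the remaining amount, precomputes one multiplicity counter per partition, hoists the width factor out of the inner loop, and computes the gcd exponent over distinct parts as count_i*count_j*gcd(i,j) instead of over every individual part.
import Mathlib
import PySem

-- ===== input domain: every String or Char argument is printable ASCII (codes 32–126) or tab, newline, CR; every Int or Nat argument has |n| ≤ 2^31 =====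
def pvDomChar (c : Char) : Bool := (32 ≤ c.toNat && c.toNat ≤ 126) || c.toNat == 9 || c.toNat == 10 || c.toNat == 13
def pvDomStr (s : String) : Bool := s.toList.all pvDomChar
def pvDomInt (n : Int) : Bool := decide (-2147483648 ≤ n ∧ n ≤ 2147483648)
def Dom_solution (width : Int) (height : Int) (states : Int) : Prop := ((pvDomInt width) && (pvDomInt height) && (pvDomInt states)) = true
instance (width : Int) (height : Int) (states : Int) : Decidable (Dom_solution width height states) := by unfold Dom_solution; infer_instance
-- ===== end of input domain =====

-- B counts matrices up to row/column permutation like A (Burnside over pairs of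
-- integer partitions) but generates partitions by a different recursion (minimum-part
-- bound on the remaining amount) and groups the gcd exponent by part multiplicities.

-- ===== PORT A =====

-- math.factorial; faithful for n ≥ 0 (negative arguments raise in Python, excluded by Pre_)
def factInt (n : Int) : Int := (Nat.factorial n.toNat : Int)

-- the while-loop of A's gcd: while b != 0: a, b = b, a % b
def gcdLoopA (a b : Nat) : Nat :=
  if b = 0 then a else gcdLoopA b (a % b)
  decreasing_by exact Nat.mod_lt _ (Nat.pos_of_ne_zero (by assumption))

-- A's gcd(b, a): a, b = abs(a), abs(b); loop; return a
def pyGcdA (b a : Int) : Int := (gcdLoopA a.natAbs b.natAbs : Int)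

-- one level of A's generator: yield (1,)+p; if p and (len(p) < 2 or p[1] > p[0]): yield (p[0]+1,)+p[1:]
def stepA (p : List Int) : List (List Int) :=
  [(1 : Int) :: p] ++
    (match p with
     | [] => []
     | [a] => [[a + 1]]
     | a :: b :: t => if a < b then [(a + 1) :: b :: t] else [])

def partitionsA : Nat → List (List Int)
  | 0 => [[]]
  | n + 1 => (partitionsA n).flatMap stepA

-- coefficient_factor; the Counter count b is ≥ 1, so a**b is ab.1 ^ ab.2.toNat
def coefficientFactor (partition : List Int) (n : Int) : Int :=
  (PySem.Dict.counter partition).items.foldl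
    (fun output ab => PySem.Int.floordiv output (ab.1 ^ ab.2.toNat * factInt ab.2)) (factInt n)

-- A's solution; partitions(n) for n < 0 raises RecursionError in Python (excluded by
-- Pre_), so .toNat is exact here; power is a sum of gcds of positive parts, hence ≥ 0,
-- so states ** power is states ^ power.toNat
def solution (width : Int) (height : Int) (states : Int) : String :=
  let heightPartitions := partitionsA height.toNat
  let n : Int :=
    (partitionsA width.toNat).foldl (fun n wp =>
      heightPartitions.foldl (fun n hp =>
        let widthFactor := coefficientFactor wp width
        let heightFactor := coefficientFactor hp height
        let power : Int :=
          wp.foldl (fun power i => hp.foldl (fun power j => power + pyGcdA i j) power) 0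
        n + widthFactor * heightFactor * states ^ power.toNat) n) 0
  PySem.Int.toStr (PySem.Int.floordiv n (factInt width * factInt height))

-- ===== PORT B =====

-- math.gcd
def mathGcd (i j : Int) : Int := (Nat.gcd i.natAbs j.natAbs : Int)

-- _parts_min(n, m): partitions of n, ascending lists, parts ≥ m; recursion on the
-- remaining amount.  'max m 1' only guards totality: B is never called with m = 0
-- (Python would not terminate there), all recursive calls have m = k ≥ 1.
def partsMin (n m : Nat) : List (List Int) :=
  if _h : n = 0 then [[]]
  else
    (List.range' (max m 1) (n + 1 - max m 1)).attach.flatMap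
      (fun k => (partsMin (n - k.1) k.1).map (fun rest => (k.1 : Int) :: rest))
  termination_by n
  decreasing_by
    have := List.mem_range'_1.mp k.2
    omega

-- _counter: c = {}; for x in xs: c[x] = c.get(x, 0) + 1; list(c.items())
def bCounter (xs : List Int) : List (Int × Int) :=
  (xs.foldl (fun d x => d.insert x (d.getD x 0 + 1)) PySem.Dict.empty).items

-- _factor(items, n); counts b are ≥ 1, so a ** b is ab.1 ^ ab.2.toNat
def bFactor (items : List (Int × Int)) (n : Int) : Int :=
  items.foldl (fun out ab => PySem.Int.floordiv out (ab.1 ^ ab.2.toNat * factInt ab.2)) (factInt n)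

-- B's solution; as in A, negative width/height raise in Python (factorial) and power ≥ 0
def solution_alt (width : Int) (height : Int) (states : Int) : String :=
  let wcs := (partsMin width.toNat 1).map bCounter
  let hcs := (partsMin height.toNat 1).map bCounter
  let total : Int :=
    wcs.foldl (fun total wc =>
      let wf := bFactor wc width
      hcs.foldl (fun total hc =>
        let hf := bFactor hc height
        let power : Int :=
          (wc.flatMap (fun ic => hc.map (fun jc => ic.2 * jc.2 * mathGcd ic.1 jc.1))).sum
        total + wf * hf * states ^ power.toNat) total) 0
  PySem.Int.toStr (PySem.Int.floordiv total (factInt width * factInt height))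

-- ===== PRECONDITION & SPEC =====

-- For width < 0 or height < 0 Python A raises (RecursionError in partitions /
-- ValueError in factorial); those inputs are excluded.
def Pre_solution (width : Int) (height : Int) (states : Int) : Prop :=
  0 ≤ width ∧ 0 ≤ height

instance (width : Int) (height : Int) (states : Int) : Decidable (Pre_solution width height states) := by
  unfold Pre_solution; infer_instance

def pvWitness_solution : Int × Int × Int := (3, 2, 5)

def Spec_solution (width : Int) (height : Int) (states : Int) (out : String) : Prop :=
  out = solution_alt width height states

instance (width : Int) (height : Int) (states : Int) (out : String) : Decidable (Spec_solution width height states out) := by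
  unfold Spec_solution; infer_instance

-- ===== CLAIM (what is proved, stated in full; the proofs are below) =====
def Claim_equal_solution : Prop := ∀ (width : Int) (height : Int) (states : Int), Dom_solution width height states → Pre_solution width height states → Spec_solution width height states (solution width height states)

-- ===== LEMMAS AND PROOFS =====

-- The two gcd implementations agree
theorem gcdLoopA_eq_gcd (a b : Nat) : gcdLoopA a b = Nat.gcd b a := by
  induction b using Nat.strong_induction_on generalizing a with
  | _ b ih =>
    rw [gcdLoopA]
    by_cases hb : b = 0
    · simp [hb]
    · rw [if_neg hb, ih (a % b) (Nat.mod_lt _ (Nat.pos_of_ne_zero hb))]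
      exact (Nat.gcd_rec b a).symm

theorem pyGcdA_eq_mathGcd (i j : Int) : pyGcdA i j = mathGcd i j := by
  simp [pyGcdA, mathGcd, gcdLoopA_eq_gcd]

-- B's hand-built counter is Counter(xs)
theorem bCounter_eq (xs : List Int) :
    bCounter xs = (PySem.Dict.counter xs).items := by
  unfold bCounter
  rw [PySem.Dict.foldl_insert_getD_add_one_eq_counter]

theorem bFactor_eq (p : List Int) (n : Int) :
    bFactor (bCounter p) n = coefficientFactor p n := by
  rw [bFactor, bCounter_eq, coefficientFactor]

-- grouping: summing g over a list = summing count(k) * g(k) over its distinct values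
theorem sum_count_mul (xs : List Int) (g : Int → Int) :
    ((PySem.Set.ofList xs).map (fun k => (xs.count k : Int) * g k)).sum
      = (xs.map g).sum := by
  have hset : (PySem.Set.ofList xs).toFinset = xs.toFinset := by
    ext a; simp [PySem.Set.mem_ofList]
  rw [← List.sum_toFinset _ (PySem.Set.nodup_ofList xs), hset,
    Finset.sum_list_map_count xs g]
  exact Finset.sum_congr rfl fun m _ => by simp

-- partitions as predicate: ascending, parts ≥ m, sum n
def IsPart (m n : Nat) (p : List Int) : Prop :=
  List.Pairwise (· ≤ ·) p ∧ (∀ x ∈ p, (m : Int) ≤ x) ∧ p.sum = (n : Int)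

-- parts bounded below by 1 make the sum at least the length
theorem length_le_sum {m : Int} {p : List Int} (hm : 1 ≤ m) (h : ∀ x ∈ p, m ≤ x) :
    (p.length : Int) ≤ p.sum := by
  induction p with
  | nil => simp
  | cons a t ih =>
    have ha := h a (by simp)
    have ht := ih (fun x hx => h x (by simp [hx]))
    simp only [List.length_cons, List.sum_cons]
    push_cast
    omega

theorem mem_partitionsA (n : Nat) (p : List Int) :
    p ∈ partitionsA n ↔ IsPart 1 n p := by
  induction n generalizing p with
  | zero =>
    simp only [partitionsA, List.mem_singleton]
    constructor
    · rintro rfl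
      exact ⟨by simp, by simp, by simp⟩
    · rintro ⟨hs, hpos, hsum⟩
      rcases p with _ | ⟨a, t⟩
      · rfl
      · exfalso
        have hl := length_le_sum (le_refl (1:Int)) hpos
        rw [hsum] at hl
        simp only [List.length_cons] at hl
        push_cast at hl
        omega
  | succ n ih =>
    simp only [partitionsA, List.mem_flatMap]
    constructor
    · rintro ⟨q, hq, hp⟩
      obtain ⟨hs, hpos, hsum⟩ := (ih q).mp hq
      simp only [stepA, List.mem_append, List.mem_singleton] at hp
      rcases hp with rfl | hp
      · refine ⟨List.pairwise_cons.mpr ⟨fun x hx => hpos x hx, hs⟩, ?_, ?_⟩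
        · intro x hx
          rcases List.mem_cons.mp hx with rfl | hx
          · omega
          · exact hpos x hx
        · simp only [List.sum_cons, hsum]
          push_cast
          ring
      · match q, hp with
        | [a], hp =>
          simp only [List.mem_singleton] at hp
          subst hp
          have ha := hpos a (by simp)
          simp only [List.sum_cons, List.sum_nil, add_zero] at hsum
          refine ⟨by simp, by intro x hx; simp at hx; omega, ?_⟩
          simp only [List.sum_cons, List.sum_nil, add_zero, hsum]
          push_cast
          ring
        | a :: b :: t, hp =>
          rw [List.mem_ite_nil_right] at hp
          obtain ⟨hab, hp⟩ := hp
          simp only [List.mem_singleton] at hp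
          subst hp
          obtain ⟨ha1, hrest⟩ := List.pairwise_cons.mp hs
          refine ⟨List.pairwise_cons.mpr ⟨?_, hrest⟩, ?_, ?_⟩
          · intro x hx
            rcases List.mem_cons.mp hx with rfl | hx
            · omega
            · have := (List.pairwise_cons.mp hrest).1 x hx
              omega
          · intro x hx
            rcases List.mem_cons.mp hx with rfl | hx
            · have := hpos a (by simp)
              omega
            · exact hpos x (by simp [hx])
          · simp only [List.sum_cons] at hsum ⊢
            push_cast at hsum ⊢
            omega
    · rintro ⟨hs, hpos, hsum⟩
      rcases p with _ | ⟨a, t⟩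
      · exfalso
        simp only [List.sum_nil] at hsum
        push_cast at hsum
        omega
      have ha1 : (1:Int) ≤ a := hpos a (by simp)
      obtain ⟨hat, hst⟩ := List.pairwise_cons.mp hs
      simp only [List.sum_cons] at hsum
      by_cases h1 : a = 1
      · refine ⟨t, (ih t).mpr ⟨hst, fun x hx => hpos x (by simp [hx]), ?_⟩, ?_⟩
        · push_cast at hsum ⊢
          omega
        · subst h1
          simp [stepA]
      · have ha2 : (2:Int) ≤ a := by omega
        refine ⟨(a - 1) :: t, (ih _).mpr ⟨?_, ?_, ?_⟩, ?_⟩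
        · exact List.pairwise_cons.mpr ⟨fun x hx => by have := hat x hx; omega, hst⟩
        · intro x hx
          rcases List.mem_cons.mp hx with rfl | hx
          · omega
          · have := hpos x (by simp [hx])
            omega
        · simp only [List.sum_cons]
          push_cast at hsum ⊢
          omega
        · rcases t with _ | ⟨b, t'⟩
          · simp only [stepA, List.mem_append, List.mem_cons]
            right
            have : a - 1 + 1 = a := by ring
            rw [this]
            exact Or.inl rfl
          · have hab : a ≤ b := hat b (by simp)
            simp only [stepA, List.mem_append, List.mem_singleton]
            right
            rw [if_pos (by omega : a - 1 < b)]
            simp only [List.mem_singleton]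
            have : a - 1 + 1 = a := by ring
            rw [this]

-- every child of stepA q determines q (parts of q are ≥ 1)
def parentA (p : List Int) : List Int :=
  match p with
  | [] => []
  | a :: t => if a = 1 then t else (a - 1) :: t

theorem parentA_of_mem_stepA {q p : List Int} (hq : ∀ x ∈ q, (1:Int) ≤ x)
    (hp : p ∈ stepA q) : parentA p = q := by
  simp only [stepA, List.mem_append, List.mem_singleton] at hp
  rcases hp with rfl | hp
  · simp [parentA]
  · match q, hp with
    | [a], hp =>
      simp only [List.mem_singleton] at hp
      subst hp
      have := hq a (by simp)
      simp only [parentA, if_neg (by omega : ¬a + 1 = 1)]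
      have : a + 1 - 1 = a := by ring
      rw [this]
    | a :: b :: t, hp =>
      rw [List.mem_ite_nil_right] at hp
      obtain ⟨hab, hp⟩ := hp
      simp only [List.mem_singleton] at hp
      subst hp
      have := hq a (by simp)
      simp only [parentA, if_neg (by omega : ¬a + 1 = 1)]
      have : a + 1 - 1 = a := by ring
      rw [this]

theorem nodup_stepA {q : List Int} (hq : ∀ x ∈ q, (1:Int) ≤ x) : (stepA q).Nodup := by
  match q with
  | [] => exact List.nodup_singleton _
  | [a] =>
    have := hq a (by simp)
    simp only [stepA]
    refine List.nodup_cons.mpr ⟨?_, by simp⟩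
    intro hm
    have hm' : ((1:Int) :: [a]) ∈ [[a + 1]] := hm
    simp only [List.mem_singleton] at hm'
    have := (List.cons_eq_cons.mp hm').1
    omega
  | a :: b :: t =>
    have := hq a (by simp)
    simp only [stepA]
    split_ifs with hab
    · refine List.nodup_cons.mpr ⟨?_, by simp⟩
      intro hm
      have hm' : ((1:Int) :: a :: b :: t) ∈ [(a + 1) :: b :: t] := hm
      simp only [List.mem_singleton] at hm'
      have := (List.cons_eq_cons.mp hm').1
      omega
    · exact List.nodup_singleton _

theorem nodup_partitionsA (n : Nat) : (partitionsA n).Nodup := by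
  induction n with
  | zero => simp [partitionsA]
  | succ n ih =>
    rw [partitionsA, List.nodup_flatMap]
    constructor
    · intro q hq
      exact nodup_stepA ((mem_partitionsA n q).mp hq).2.1
    · refine (List.Pairwise.imp_of_mem ?_ ih)
      intro q q' hq hq' hne
      simp only [Function.onFun]
      rw [List.disjoint_left]
      intro p hpq hpq'
      have h1 := parentA_of_mem_stepA ((mem_partitionsA n q).mp hq).2.1 hpq
      have h2 := parentA_of_mem_stepA ((mem_partitionsA n q').mp hq').2.1 hpq'
      exact hne (h1 ▸ h2 ▸ rfl)

theorem mem_partsMin (n m : Nat) (hm : 1 ≤ m) (p : List Int) :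
    p ∈ partsMin n m ↔ IsPart m n p := by
  induction n using Nat.strong_induction_on generalizing m p with
  | _ n ih =>
    rw [partsMin]
    by_cases h0 : n = 0
    · subst h0
      rw [dif_pos rfl]
      simp only [List.mem_singleton]
      constructor
      · rintro rfl
        exact ⟨by simp, by simp, by simp⟩
      · rintro ⟨hs, hge, hsum⟩
        rcases p with _ | ⟨a, t⟩
        · rfl
        · exfalso
          have hm' : (1:Int) ≤ (m:Int) := by exact_mod_cast hm
          have hl := length_le_sum hm' hge
          rw [hsum] at hl
          simp only [List.length_cons] at hl
          push_cast at hl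
          omega
    · rw [dif_neg h0]
      have hmax : max m 1 = m := by omega
      rw [hmax]
      simp only [List.mem_flatMap, List.mem_attach, true_and, List.mem_map]
      constructor
      · rintro ⟨⟨k, hk⟩, ⟨rest, hrest, rfl⟩⟩
        obtain ⟨hmk, hkn⟩ := List.mem_range'_1.mp hk
        have hk1 : 1 ≤ k := le_trans hm hmk
        have hkn' : k ≤ n := by omega
        obtain ⟨hs, hge, hsum⟩ := (ih (n - k) (by omega) k hk1 rest).mp hrest
        refine ⟨List.pairwise_cons.mpr ⟨fun x hx => hge x hx, hs⟩, ?_, ?_⟩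
        · intro x hx
          rcases List.mem_cons.mp hx with rfl | hx
          · exact_mod_cast hmk
          · have := hge x hx
            have : (m:Int) ≤ (k:Int) := by exact_mod_cast hmk
            have := hge x hx
            omega
        · simp only [List.sum_cons, hsum]
          omega
      · rintro ⟨hs, hge, hsum⟩
        rcases p with _ | ⟨a, t⟩
        · exfalso
          simp only [List.sum_nil] at hsum
          exact h0 (by exact_mod_cast hsum.symm)
        have ham : (m:Int) ≤ a := hge a (by simp)
        have ha1 : (1:Int) ≤ a := le_trans (by exact_mod_cast hm) ham
        obtain ⟨hat, hst⟩ := List.pairwise_cons.mp hs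
        have hm1 : (1:Int) ≤ (m:Int) := by exact_mod_cast hm
        have htsum : (0:Int) ≤ t.sum :=
          le_trans (by positivity) (length_le_sum hm1 (fun x hx => hge x (by simp [hx])))
        simp only [List.sum_cons] at hsum
        set k := a.toNat with hkdef
        have hak : a = (k:Int) := by omega
        have hmk : m ≤ k := by omega
        have hkn : k ≤ n := by omega
        refine ⟨⟨k, List.mem_range'_1.mpr ⟨hmk, by omega⟩⟩, ⟨t, ?_, congrArg (fun z : Int => z :: t) hak.symm⟩⟩
        refine (ih (n - k) (by omega) k (by omega) t).mpr ⟨hst, ?_, ?_⟩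
        · intro x hx
          have := hat x hx
          omega
        · omega

theorem nodup_partsMin (n m : Nat) : (partsMin n m).Nodup := by
  induction n using Nat.strong_induction_on generalizing m with
  | _ n ih =>
    rw [partsMin]
    by_cases h0 : n = 0
    · subst h0
      rw [dif_pos rfl]
      simp
    · rw [dif_neg h0]
      rw [List.nodup_flatMap]
      constructor
      · rintro ⟨k, hk⟩ -
        have hk' := List.mem_range'_1.mp hk
        refine (ih (n - k) (by omega) k).map ?_
        intro x y hxy
        exact (List.cons_eq_cons.mp hxy).2
      · refine List.Pairwise.imp_of_mem ?_ (List.nodup_attach.mpr (List.nodup_range'))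
        rintro ⟨k, hk⟩ ⟨k', hk'⟩ - - hne
        simp only [Function.onFun]
        rw [List.disjoint_left]
        rintro p hp hp'
        simp only [List.mem_map] at hp hp'
        obtain ⟨r, -, rfl⟩ := hp
        obtain ⟨r', -, he⟩ := hp'
        have : (k' : Int) = (k : Int) := (List.cons_eq_cons.mp he).1
        exact hne (Subtype.ext (by exact_mod_cast this.symm))

theorem perm_partitions (n : Nat) : (partitionsA n).Perm (partsMin n 1) := by
  refine (List.perm_ext_iff_of_nodup (nodup_partitionsA n) (nodup_partsMin n 1)).mpr ?_
  intro p
  rw [mem_partitionsA, mem_partsMin n 1 (le_refl 1)]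

theorem sum_flatMap' {A : Type} (l : List A) (f : A → List Int) :
    (l.flatMap f).sum = (l.map (fun x => (f x).sum)).sum := by
  induction l with
  | nil => simp
  | cons a t ih => simp [List.flatMap_cons, ih]

theorem foldl_foldl_add {A B : Type} (LA : List A) (LH : List B) (F : A → B → Int) (init : Int) :
    LA.foldl (fun n wp => LH.foldl (fun n hp => n + F wp hp) n) init
      = init + (LA.map (fun wp => (LH.map (F wp)).sum)).sum := by
  induction LA generalizing init with
  | nil => simp
  | cons a t ih =>
    rw [List.foldl_cons, ih, PySem.List.foldl_add, List.map_cons, List.sum_cons]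
    ring

theorem powA_eq (wp hp : List Int) :
    wp.foldl (fun power i => hp.foldl (fun power j => power + pyGcdA i j) power) 0
      = (wp.map (fun i => (hp.map (fun j => mathGcd i j)).sum)).sum := by
  rw [foldl_foldl_add wp hp (fun i j => pyGcdA i j) 0, zero_add]
  simp [pyGcdA_eq_mathGcd]

theorem powB_eq (p q : List Int) :
    ((bCounter p).flatMap (fun ic => (bCounter q).map (fun jc => ic.2 * jc.2 * mathGcd ic.1 jc.1))).sum
      = (p.map (fun i => (q.map (fun j => mathGcd i j)).sum)).sum := by
  rw [bCounter_eq, bCounter_eq, PySem.Dict.items_counter, PySem.Dict.items_counter,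
    sum_flatMap', List.map_map]
  have houter : ((PySem.Set.ofList p).map
      ((fun ic : Int × Int => (((PySem.Set.ofList q).map (fun k => (k, (q.count k : Int)))).map
          (fun jc => ic.2 * jc.2 * mathGcd ic.1 jc.1)).sum) ∘ (fun k => (k, (p.count k : Int)))))
      = (PySem.Set.ofList p).map
          (fun k => (p.count k : Int) * (q.map (fun j => mathGcd k j)).sum) := by
    apply List.map_congr_left
    intro k _
    simp only [Function.comp_apply, List.map_map]
    have hin : ((PySem.Set.ofList q).map
        ((fun jc : Int × Int => (p.count k : Int) * jc.2 * mathGcd k jc.1) ∘ (fun k' => (k', (q.count k' : Int)))))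
        = (PySem.Set.ofList q).map (fun k' => (p.count k : Int) * ((q.count k' : Int) * mathGcd k k')) := by
      apply List.map_congr_left
      intro x _
      simp only [Function.comp_apply]
      ring
    rw [hin, List.sum_map_mul_left, sum_count_mul q (fun j => mathGcd k j)]
  rw [houter, sum_count_mul p (fun i => (q.map (fun j => mathGcd i j)).sum)]

-- both accumulation loops compute the same number
theorem sums_eq (width height states : Int) :
    (partitionsA width.toNat).foldl (fun n wp =>
      (partitionsA height.toNat).foldl (fun n hp =>
        n + coefficientFactor wp width * coefficientFactor hp height *
          states ^ (wp.foldl (fun power i =>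
            hp.foldl (fun power j => power + pyGcdA i j) power) 0).toNat) n) 0
    = ((partsMin width.toNat 1).map bCounter).foldl (fun total wc =>
        ((partsMin height.toNat 1).map bCounter).foldl (fun total hc =>
          total + bFactor wc width * bFactor hc height *
            states ^ ((wc.flatMap (fun ic =>
              hc.map (fun jc => ic.2 * jc.2 * mathGcd ic.1 jc.1))).sum).toNat) total) 0 := by
  rw [foldl_foldl_add, foldl_foldl_add, zero_add, zero_add, List.map_map]
  set T : List Int → List Int → Int := fun p q =>
    coefficientFactor p width * coefficientFactor q height *
      states ^ ((p.map (fun i => (q.map (fun j => mathGcd i j)).sum)).sum).toNat with hT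
  have hAterm : ∀ p : List Int,
      (fun hp => coefficientFactor p width * coefficientFactor hp height *
        states ^ (p.foldl (fun power i =>
          hp.foldl (fun power j => power + pyGcdA i j) power) 0).toNat) = T p := by
    intro p
    funext q
    rw [hT, powA_eq]
  have hBterm : ∀ p q : List Int,
      bFactor (bCounter p) width * bFactor (bCounter q) height *
        states ^ (((bCounter p).flatMap (fun ic =>
          (bCounter q).map (fun jc => ic.2 * jc.2 * mathGcd ic.1 jc.1))).sum).toNat = T p q := by
    intro p q
    rw [hT, bFactor_eq, bFactor_eq, powB_eq]
  calc ((partitionsA width.toNat).map (fun wp =>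
          ((partitionsA height.toNat).map (fun hp =>
            coefficientFactor wp width * coefficientFactor hp height *
              states ^ (wp.foldl (fun power i =>
                hp.foldl (fun power j => power + pyGcdA i j) power) 0).toNat)).sum)).sum
      = ((partitionsA width.toNat).map (fun p => ((partitionsA height.toNat).map (T p)).sum)).sum := by
        apply congrArg
        apply List.map_congr_left
        intro p _
        rw [hAterm p]
    _ = ((partsMin width.toNat 1).map (fun p => ((partsMin height.toNat 1).map (T p)).sum)).sum := by
        have hin : ∀ p : List Int,
            ((partitionsA height.toNat).map (T p)).sum = ((partsMin height.toNat 1).map (T p)).sum :=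
          fun p => ((perm_partitions height.toNat).map (T p)).sum_eq
        rw [List.map_congr_left (fun p _ => hin p)]
        exact ((perm_partitions width.toNat).map _).sum_eq
    _ = ((partsMin width.toNat 1).map ((fun wc =>
          (((partsMin height.toNat 1).map bCounter).map (fun hc =>
            bFactor wc width * bFactor hc height *
              states ^ ((wc.flatMap (fun ic =>
                hc.map (fun jc => ic.2 * jc.2 * mathGcd ic.1 jc.1))).sum).toNat)).sum) ∘ bCounter)).sum := by
        apply congrArg
        apply List.map_congr_left
        intro p _
        simp only [Function.comp_apply, List.map_map]
        apply congrArg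
        apply List.map_congr_left
        intro q _
        simp only [Function.comp_apply]
        rw [hBterm p q]

-- ===== VERDICT (by name: the statement is the Claim_ definition above) =====
theorem solution_spec : Claim_equal_solution := by
  intro width height states _ _
  unfold Spec_solution
  simp only [solution, solution_alt]
  rw [sums_eq width height states]
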